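-- pv_equiv track=rewrite | github.com/lisiynos/tasks | comb3/combr2.py | F
-- ===== SOURCE A (Python) =====
-- res = {}
--
-- def C(n, k, d):
--     assert 1 <= d <= n
--     if k == 1:  # Из одного элемента с одной цифрой - один вариант
--         return 1
--     if (n, k, d) not in res:  # Если не считали - считаем
--         res[n, k, d] = sum(C(n, k - 1, t) for t in range(d, n + 1))
--     return res[n, k, d]
--
-- def F(n, k, comb):
--     x = 0
--     last = 1
--     for i in range(k):  # Идём по длине комбинации
--         for g in range(last, comb[i]):
--             x += C(n, k - i, g)
--             last = comb[i]
--     return x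
-- ===== SOURCE B (Python) =====
-- def _binom(a, b):
--     # C(a, b) for integers a >= 0, b >= 0, by the exact multiplicative formula
--     r = 1
--     for j in range(b):
--         r = r * (a - j) // (j + 1)
--     return r
--
-- def F(n, k, comb):
--     x = 0
--     last = 1
--     for i in range(k):
--         c = comb[i]
--         if c > last:
--             m = k - i
--             x += _binom(n - last + m, m) - _binom(n - c + m, m)
--             last = c
--     return x
-- ===== Notes on version B (the rewrite author's own statement) =====
-- stated objective: faster
-- what changed: A counts via the memoized recursion C(n,k,d)=sum_t C(n,k-1,t) and sums it value by value in the inner loop; B replaces C with the closed-form binomial binom(n-d+k-1,k-1) (computed by an exact multiplicative product) and telescopes the whole inner loop into a difference of two binomials, so no recursion and no inner summation remain.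
import Mathlib
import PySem

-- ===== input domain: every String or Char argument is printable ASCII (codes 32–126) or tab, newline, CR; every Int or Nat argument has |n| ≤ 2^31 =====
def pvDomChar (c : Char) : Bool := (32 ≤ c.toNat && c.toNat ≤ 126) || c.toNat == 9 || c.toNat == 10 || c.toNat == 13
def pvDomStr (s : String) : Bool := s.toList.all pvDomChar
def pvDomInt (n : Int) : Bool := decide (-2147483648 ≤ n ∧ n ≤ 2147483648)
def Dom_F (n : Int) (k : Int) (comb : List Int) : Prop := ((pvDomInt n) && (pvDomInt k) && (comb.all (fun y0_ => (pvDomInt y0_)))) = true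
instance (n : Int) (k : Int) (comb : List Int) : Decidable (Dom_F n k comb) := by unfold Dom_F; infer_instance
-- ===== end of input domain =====

-- B replaces A's memoized recursive count C with the closed-form binomial computed by an
-- exact multiplicative product, and telescopes A's inner summation loop into a difference
-- of two binomials (objective: faster).

-- ===== PORT A =====
-- A's helper C, memoized in the Python via the global dict `res`; the memo only affects
-- cost, not the value, so the port is the same recursion without the table. F only ever
-- calls C with k ≥ 1, so the (unreachable from F) 0 case is given an arbitrary value 0.
def F_CA (n : Int) : Nat → Int → Int
  | 0, _ => 0
  | 1, _ => 1
  | m + 2, d =>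
      (PySem.List.pyRange d (n + 1) 1).foldl (fun acc t => acc + F_CA n (m + 1) t) 0

def F (n : Int) (k : Int) (comb : List Int) : Int :=
  ((PySem.List.pyRange 0 k 1).foldl
    (fun (st : Int × Int) i =>
      (PySem.List.pyRange st.2 (PySem.List.pyGetD comb i 0) 1).foldl
        (fun st2 g => (st2.1 + F_CA n (k - i).toNat g, PySem.List.pyGetD comb i 0)) st)
    (0, 1)).1

-- ===== PORT B =====
-- Source B's _binom(a, b): exact multiplicative formula r = r * (a - j) // (j + 1)
def F_binom (a : Int) (b : Int) : Int :=
  (PySem.List.pyRange 0 b 1).foldl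
    (fun r j => PySem.Int.floordiv (r * (a - j)) (j + 1)) 1

def F_alt (n : Int) (k : Int) (comb : List Int) : Int :=
  ((PySem.List.pyRange 0 k 1).foldl
    (fun (st : Int × Int) i =>
      if st.2 < PySem.List.pyGetD comb i 0 then
        (st.1 + (F_binom (n - st.2 + (k - i)) (k - i)
                 - F_binom (n - PySem.List.pyGetD comb i 0 + (k - i)) (k - i)),
         PySem.List.pyGetD comb i 0)
      else st)
    (0, 1)).1

-- ===== PRECONDITION & SPEC =====
-- Pre_F is exactly where the Python A returns: it raises IndexError when k > len(comb),
-- and AssertionError when some comb[i] exceeds both n+1 and the running maximum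
-- max(1, comb[0..i-1]) (then C is called with an argument outside 1..n).
def Pre_F (n : Int) (k : Int) (comb : List Int) : Prop :=
  k ≤ (comb.length : Int) ∧
  ∀ i : Nat, i < k.toNat → comb.getD i 0 ≤ max (n + 1) ((comb.take i).foldl max 1)
instance (n : Int) (k : Int) (comb : List Int) : Decidable (Pre_F n k comb) := by
  unfold Pre_F; infer_instance
def pvWitness_F : Int × Int × List Int := (5, 3, [1, 2, 4])

def Spec_F (n : Int) (k : Int) (comb : List Int) (out : Int) : Prop := out = F_alt n k comb
instance (n : Int) (k : Int) (comb : List Int) (out : Int) : Decidable (Spec_F n k comb out) := by unfold Spec_F; infer_instance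

-- ===== CLAIM (what is proved, stated in full; the proofs are below) =====
def Claim_equal_F : Prop := ∀ (n : Int) (k : Int) (comb : List Int), Dom_F n k comb → Pre_F n k comb → Spec_F n k comb (F n k comb)

-- ===== LEMMAS AND PROOFS =====

-- choose a (j+1) * (j+1) = choose a j * (a - j), over Int (valid for all j, a : Nat)
theorem pv_choose_step (a j : Nat) :
    (a.choose j : Int) * ((a : Int) - (j : Int)) = (a.choose (j + 1) : Int) * ((j : Int) + 1) := by
  by_cases h : j ≤ a
  · have hn := Nat.choose_succ_right_eq a j
    zify [h] at hn
    linarith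
  · rw [Nat.choose_eq_zero_of_lt (by omega), Nat.choose_eq_zero_of_lt (by omega)]
    simp

-- the product loop of Source B computes the binomial coefficient
theorem pv_binom_eval (a b : Int) (ha : 0 ≤ a) (hb : 0 ≤ b) :
    F_binom a b = (a.toNat.choose b.toNat : Int) := by
  obtain ⟨bn, rfl⟩ : ∃ bn : Nat, b = (bn : Int) := ⟨b.toNat, (Int.toNat_of_nonneg hb).symm⟩
  simp only [Int.toNat_natCast]
  clear hb
  induction bn with
  | zero => simp [F_binom, PySem.List.pyRange_one_eq_nil]
  | succ m ih =>
      unfold F_binom at ih ⊢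
      rw [show ((m + 1 : Nat) : Int) = (m : Int) + 1 by push_cast; ring,
        PySem.List.pyRange_one_succ_right (by positivity), List.foldl_append, ih]
      simp only [List.foldl_cons, List.foldl_nil]
      have hstep := pv_choose_step a.toNat m
      rw [Int.toNat_of_nonneg ha] at hstep
      rw [hstep, PySem.Int.floordiv_eq_ediv_of_pos (by positivity),
        Int.mul_ediv_cancel _ (by positivity)]

-- Pascal step: choose (N+1+m) (m+1) - choose (N+m) (m+1) = choose (N+m) m, with N = n - d ≥ 0
theorem pv_pascal (n d : Int) (m : Nat) (h1 : d ≤ n) :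
    ((n - d + (m + 1)).toNat.choose (m + 1) : Int)
      = ((n - d - 1 + (m + 1)).toNat.choose (m + 1) : Int) + ((n - d + m).toNat.choose m : Int) := by
  have h2 : (n - d + (m + 1)).toNat = (n - d + m).toNat + 1 := by omega
  have h3 : (n - d - 1 + (m + 1)).toNat = (n - d + m).toNat := by omega
  rw [h2, h3, Nat.choose_succ_succ']
  push_cast; ring

-- hockey stick: sum over t in range(d, n+1) of choose (n-t+m) m = choose (n-d+(m+1)) (m+1)
theorem pv_hockey (m : Nat) (n : Int) :
    ∀ (c : Nat) (d : Int), d = n + 1 - (c : Int) → 1 ≤ d →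
    ((PySem.List.pyRange d (n + 1) 1).map (fun t => ((n - t + m).toNat.choose m : Int))).sum
      = ((n - d + (m + 1)).toNat.choose (m + 1) : Int) := by
  intro c
  induction c with
  | zero =>
      intro d hd _
      have : d = n + 1 := by omega
      subst this
      rw [PySem.List.pyRange_one_eq_nil le_rfl]
      have : (n - (n + 1) + (m + 1)).toNat = m := by omega
      rw [this, Nat.choose_eq_zero_of_lt (Nat.lt_succ_self m)]
      simp
  | succ c ih =>
      intro d hd h1
      have hdn : d ≤ n := by push_cast at hd; omega
      rw [PySem.List.pyRange_one_cons (by omega), List.map_cons, List.sum_cons,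
        ih (d + 1) (by push_cast at hd ⊢; omega) (by omega)]
      have := pv_pascal n d m hdn
      have h4 : n - (d + 1) + (m + 1) = n - d - 1 + (m + 1) := by ring
      rw [h4]; linarith

-- closed form for A's count C: C(n, m+1, d) = choose (n-d+m) m
theorem pv_CA_eq (m : Nat) : ∀ (n d : Int), 1 ≤ d → d ≤ n + 1 →
    F_CA n (m + 1) d = ((n - d + m).toNat.choose m : Int) := by
  induction m with
  | zero => intro n d _ _; simp [F_CA]
  | succ m ih =>
      intro n d h1 h2
      show (PySem.List.pyRange d (n + 1) 1).foldl (fun acc t => acc + F_CA n (m + 1) t) 0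
        = ((n - d + (m + 1)).toNat.choose (m + 1) : Int)
      rw [PySem.List.foldl_add, zero_add]
      have hmap : (PySem.List.pyRange d (n + 1) 1).map (fun t => F_CA n (m + 1) t)
          = (PySem.List.pyRange d (n + 1) 1).map (fun t => ((n - t + m).toNat.choose m : Int)) :=
        List.map_congr_left (fun t ht => by
          rw [PySem.List.mem_pyRange_one] at ht
          exact ih n t (by omega) (by omega))
      rw [hmap, pv_hockey m n (n + 1 - d).toNat d (by omega) h1]

-- S d = choose (n-d+(m+1)) (m+1); the inner sum of A telescopes to S last - S c
theorem pv_sum_CA (n : Int) (m : Nat) :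
    ∀ (c : Nat) (last hi : Int), hi = last + (c : Int) → 1 ≤ last → hi ≤ n + 1 →
    ((PySem.List.pyRange last hi 1).map (F_CA n (m + 1))).sum
      = ((n - last + (m + 1)).toNat.choose (m + 1) : Int)
        - ((n - hi + (m + 1)).toNat.choose (m + 1) : Int) := by
  intro c
  induction c with
  | zero =>
      intro last hi he _ _
      have : hi = last := by omega
      subst this
      rw [PySem.List.pyRange_one_eq_nil le_rfl]; simp
  | succ c ih =>
      intro last hi he h1 h2
      have hlt : last < hi := by omega
      have hlast_n : last ≤ n := by omega
      rw [PySem.List.pyRange_one_cons hlt, List.map_cons, List.sum_cons,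
        ih (last + 1) hi (by push_cast at he ⊢; omega) (by omega) h2,
        pv_CA_eq m n last h1 (by omega)]
      have := pv_pascal n last m hlast_n
      have h4 : n - (last + 1) + (m + 1) = n - last - 1 + (m + 1) := by ring
      rw [h4]; linarith

-- inner loop of A with the second component already pinned to c
theorem pv_pairfold_aux (f : Int → Int) (c : Int) :
    ∀ (l : List Int) (x : Int),
    l.foldl (fun (st2 : Int × Int) g => (st2.1 + f g, c)) (x, c)
      = (x + (l.map f).sum, c) := by
  intro l
  induction l with
  | nil => intro x; simp
  | cons g gs ih =>
      intro x
      simp only [List.foldl_cons]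
      rw [ih (x + f g)]
      simp [add_assoc]

-- a nonempty inner loop of A: accumulates the sum in .1 and pins .2 to c
theorem pv_pairfold (f : Int → Int) (c : Int) (l : List Int) (x y : Int) (h : l ≠ []) :
    l.foldl (fun (st2 : Int × Int) g => (st2.1 + f g, c)) (x, y)
      = (x + (l.map f).sum, c) := by
  cases l with
  | nil => exact absurd rfl h
  | cons g gs =>
      simp only [List.foldl_cons]
      rw [pv_pairfold_aux f c gs (x + f g)]
      simp [add_assoc]

-- the hypotheses the outer loop needs about the remaining indices, threaded through the
-- evolving value of `last` (which is the running maximum)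
def HypF (n k : Int) (comb : List Int) : List Int → Int → Prop
  | [], _ => True
  | i :: l, last =>
      0 ≤ i ∧ i < k ∧ PySem.List.pyGetD comb i 0 ≤ max (n + 1) last ∧
      HypF n k comb l (max last (PySem.List.pyGetD comb i 0))

-- outer loops of A and B stay in lock-step
theorem pv_outer (n k : Int) (comb : List Int) :
    ∀ (l : List Int) (x last : Int), 1 ≤ last → HypF n k comb l last →
    l.foldl
      (fun (st : Int × Int) i =>
        (PySem.List.pyRange st.2 (PySem.List.pyGetD comb i 0) 1).foldl
          (fun st2 g => (st2.1 + F_CA n (k - i).toNat g, PySem.List.pyGetD comb i 0)) st)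
      (x, last)
    = l.foldl
      (fun (st : Int × Int) i =>
        if st.2 < PySem.List.pyGetD comb i 0 then
          (st.1 + (F_binom (n - st.2 + (k - i)) (k - i)
                   - F_binom (n - PySem.List.pyGetD comb i 0 + (k - i)) (k - i)),
           PySem.List.pyGetD comb i 0)
        else st)
      (x, last) := by
  intro l
  induction l with
  | nil => intro x last _ _; rfl
  | cons i l ih =>
      intro x last hlast hhyp
      obtain ⟨hi0, hik, hc, hyp'⟩ := hhyp
      simp only [List.foldl_cons]
      by_cases hlc : last < PySem.List.pyGetD comb i 0
      · -- inner loop runs; both add the same telescoped quantity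
        have hcn : PySem.List.pyGetD comb i 0 ≤ n + 1 := by omega
        have hm : 1 ≤ k - i := by omega
        obtain ⟨m, hm1⟩ : ∃ m : Nat, (k - i).toNat = m + 1 :=
          ⟨(k - i).toNat - 1, by omega⟩
        have hrange_ne : PySem.List.pyRange last (PySem.List.pyGetD comb i 0) 1 ≠ [] := by
          rw [PySem.List.pyRange_one_cons hlc]; simp
        have hsum : ((PySem.List.pyRange last (PySem.List.pyGetD comb i 0) 1).map
              (F_CA n (k - i).toNat)).sum
            = ((n - last + (m + 1)).toNat.choose (m + 1) : Int)
              - ((n - PySem.List.pyGetD comb i 0 + (m + 1)).toNat.choose (m + 1) : Int) := by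
          rw [hm1]
          exact pv_sum_CA n m (PySem.List.pyGetD comb i 0 - last).toNat last
            (PySem.List.pyGetD comb i 0) (by omega) (by omega) hcn
        have hb1 : F_binom (n - last + (k - i)) (k - i)
            = ((n - last + (k - i)).toNat.choose (k - i).toNat : Int) :=
          pv_binom_eval _ _ (by omega) (by omega)
        have hb2 : F_binom (n - PySem.List.pyGetD comb i 0 + (k - i)) (k - i)
            = ((n - PySem.List.pyGetD comb i 0 + (k - i)).toNat.choose (k - i).toNat : Int) :=
          pv_binom_eval _ _ (by omega) (by omega)
        have ht1 : (n - last + (k - i)).toNat = (n - last + (m + 1)).toNat := by omega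
        have ht2 : (n - PySem.List.pyGetD comb i 0 + (k - i)).toNat
            = (n - PySem.List.pyGetD comb i 0 + (m + 1)).toNat := by omega
        have hstates :
            (PySem.List.pyRange last (PySem.List.pyGetD comb i 0) 1).foldl
              (fun (st2 : Int × Int) g =>
                (st2.1 + F_CA n (k - i).toNat g, PySem.List.pyGetD comb i 0)) (x, last)
            = (x + (F_binom (n - last + (k - i)) (k - i)
                    - F_binom (n - PySem.List.pyGetD comb i 0 + (k - i)) (k - i)),
               PySem.List.pyGetD comb i 0) := by
          rw [pv_pairfold _ _ _ x last hrange_ne, hsum, hb1, hb2, ht1, ht2, hm1]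
        rw [hstates, if_pos hlc]
        have hmaxc : max last (PySem.List.pyGetD comb i 0) = PySem.List.pyGetD comb i 0 := by
          omega
        exact ih _ (PySem.List.pyGetD comb i 0) (by omega) (by rw [← hmaxc]; exact hyp')
      · -- inner loop empty; both skip
        rw [PySem.List.pyRange_one_eq_nil (by omega), if_neg hlc]
        simp only [List.foldl_nil]
        have hmaxl : max last (PySem.List.pyGetD comb i 0) = last := by omega
        exact ih x last hlast (by rw [← hmaxl]; exact hyp')

-- Pre_F yields the threaded hypothesis for the whole index range, since the running
-- maximum `last` equals max 1 (max of comb[:i])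
theorem pv_hyp_of_pre (n k : Int) (comb : List Int) (hpre : Pre_F n k comb) :
    ∀ (c : Nat) (j : Int), j = k - (c : Int) → 0 ≤ j →
    HypF n k comb (PySem.List.pyRange j k 1) ((comb.take j.toNat).foldl max 1) := by
  obtain ⟨hlen, hbd⟩ := hpre
  intro c
  induction c with
  | zero =>
      intro j hj _
      have : k ≤ j := by omega
      rw [PySem.List.pyRange_one_eq_nil this]
      trivial
  | succ c ih =>
      intro j hj hj0
      have hjk : j < k := by push_cast at hj; omega
      rw [PySem.List.pyRange_one_cons hjk]
      have hjlen : j.toNat < comb.length := by omega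
      have hget : PySem.List.pyGetD comb j 0 = comb.getD j.toNat 0 := by
        rw [PySem.List.pyGetD_eq_getElem comb 0 hj0 (by omega), List.getD_eq_getElem comb 0 hjlen]
      refine ⟨hj0, hjk, ?_, ?_⟩
      · rw [hget]; exact hbd j.toNat (by omega)
      · have htake : comb.take (j + 1).toNat = comb.take j.toNat ++ [comb[j.toNat]] := by
          have : (j + 1).toNat = j.toNat + 1 := by omega
          rw [this, List.take_add_one, List.getElem?_eq_getElem hjlen]
          rfl
        have hfold : (comb.take (j + 1).toNat).foldl max 1
            = max ((comb.take j.toNat).foldl max 1) (PySem.List.pyGetD comb j 0) := by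
          rw [htake, List.foldl_append, hget, List.getD_eq_getElem comb 0 hjlen]
          rfl
        rw [← hfold]
        exact ih (j + 1) (by push_cast at hj ⊢; omega) (by omega)

-- ===== VERDICT (by name: the statement is the Claim_ definition above) =====
theorem F_spec : Claim_equal_F := by
  intro n k comb _ hpre
  unfold Spec_F F F_alt
  by_cases hk : 0 ≤ k
  · have hhyp := pv_hyp_of_pre n k comb hpre k.toNat 0 (by omega) le_rfl
    simp only [Int.toNat_zero, List.take_zero, List.foldl_nil] at hhyp
    rw [pv_outer n k comb (PySem.List.pyRange 0 k 1) 0 1 le_rfl hhyp]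
  · rw [PySem.List.pyRange_one_eq_nil (by omega)]
    rfl
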